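-- pv_equiv track=rewrite | github.com/beaubeas/nova-blueprint | moelcules.py | get_heavy_atom_counts
-- ===== SOURCE A (Python) =====
-- def get_heavy_atom_counts(smiles: str) -> int:
--     """
--     Calculate the number of heavy atoms in a molecule from its SMILES string.
--     """
--     count = 0
--     i = 0
--     while i < len(smiles):
--         c = smiles[i]
--
--         if c.isalpha() and c.isupper():
--             elem_symbol = c
--
--             # If the next character is a lowercase letter, include it (e.g., 'Cl', 'Br')
--             if i + 1 < len(smiles) and smiles[i + 1].islower():
--                 elem_symbol += smiles[i + 1]
--                 i += 1
--
--             # If it's not 'H', count it as a heavy atom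
--             if elem_symbol != 'H':
--                 count += 1
--
--         i += 1
--
--     return count
-- ===== SOURCE B (Python) =====
-- def get_heavy_atom_counts(smiles: str) -> int:
--     # Stateless single pass: pair each character with its successor (space-padded).
--     # An uppercase letter starts an element; a trailing lowercase letter only
--     # matters for the 'H'-vs-heavy decision, so no index stride is needed.
--     return sum(1 for c, n in zip(smiles, smiles[1:] + ' ')
--                if c.isalpha() and c.isupper() and (c != 'H' or n.islower()))
-- ===== Notes on version B (the rewrite author's own statement) =====
-- stated objective: simpler
-- what changed: Replaced the mutable-index while-loop with symbol building and a skip by a stateless pairwise comprehension over zip(smiles, smiles[1:] + ' ') counting uppercase letters, with a lone 'H' excluded; the single C-level generator pass also removes per-character indexing overhead.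
import Mathlib
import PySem

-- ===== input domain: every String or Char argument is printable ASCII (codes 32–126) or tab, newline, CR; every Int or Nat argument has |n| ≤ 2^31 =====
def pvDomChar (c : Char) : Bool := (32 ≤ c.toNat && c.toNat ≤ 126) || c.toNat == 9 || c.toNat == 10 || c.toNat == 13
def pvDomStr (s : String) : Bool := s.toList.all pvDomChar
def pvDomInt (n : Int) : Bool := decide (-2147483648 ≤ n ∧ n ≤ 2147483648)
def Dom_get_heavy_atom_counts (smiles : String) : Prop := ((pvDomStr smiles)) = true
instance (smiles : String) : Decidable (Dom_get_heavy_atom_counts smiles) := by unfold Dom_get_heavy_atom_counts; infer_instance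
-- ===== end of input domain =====

-- B replaces A's mutable-index while-loop (symbol building + skip) by a stateless
-- pairwise count over the string zipped with its successor characters (simpler).

-- ===== PORT A =====
-- A's while-loop over index i, transcribed as structural recursion over the
-- remaining characters; the lookahead smiles[i+1] is the head of the rest, and
-- 'i += 1' inside the branch is the extra uncons of the skipped lowercase char.
def aLoop : List Char → Int → Int
  | [], count => count
  | c :: rest, count =>
    if PySem.Chars.isalpha c && PySem.Chars.isupper c then
      match h : rest with
      | d :: rest' =>
        if PySem.Chars.islower d then
          -- elem_symbol = c + d; skip d
          aLoop rest' (if [c, d] ≠ ['H'] then count + 1 else count)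
        else
          aLoop rest (if [c] ≠ ['H'] then count + 1 else count)
      | [] => aLoop rest (if [c] ≠ ['H'] then count + 1 else count)
    else
      aLoop rest count
  termination_by cs _ => cs.length
  decreasing_by all_goals (subst_vars; simp)

def get_heavy_atom_counts (smiles : String) : Int :=
  aLoop smiles.toList 0

-- ===== PORT B =====
-- B's per-pair predicate of the comprehension
def bPred (p : Char × Char) : Bool :=
  PySem.Chars.isalpha p.1 && PySem.Chars.isupper p.1 && (p.1 ≠ 'H' || PySem.Chars.islower p.2)

-- the sum-of-ones over zip(smiles, smiles[1:] + ' ')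
def bCount (cs : List Char) : Nat :=
  (List.zip cs (cs.drop 1 ++ [' '])).countP bPred

def get_heavy_atom_counts_alt (smiles : String) : Int :=
  (bCount smiles.toList : Nat)

-- ===== PRECONDITION & SPEC =====
def Spec_get_heavy_atom_counts (smiles : String) (out : Int) : Prop := out = get_heavy_atom_counts_alt smiles
instance (smiles : String) (out : Int) : Decidable (Spec_get_heavy_atom_counts smiles out) := by unfold Spec_get_heavy_atom_counts; infer_instance

-- ===== CLAIM (what is proved, stated in full; the proofs are below) =====
def Claim_equal_get_heavy_atom_counts : Prop := ∀ (smiles : String), Dom_get_heavy_atom_counts smiles → Spec_get_heavy_atom_counts smiles (get_heavy_atom_counts smiles)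

-- ===== LEMMAS AND PROOFS =====

theorem bCount_cons (c : Char) (rest : List Char) :
    bCount (c :: rest) = bCount rest + (if bPred (c, rest.headD ' ') then 1 else 0) := by
  cases rest with
  | nil => simp [bCount, bPred]
  | cons d rest' =>
    simp [bCount, List.countP_cons]

theorem islower_not_isupper {d : Char} (h : PySem.Chars.islower d = true) :
    PySem.Chars.isupper d = false := by
  simp only [PySem.Chars.islower, PySem.Chars.isupper, Bool.and_eq_true, decide_eq_true_eq] at *
  rcases h with ⟨h1, _⟩
  by_contra hc
  simp only [Bool.not_eq_false, Bool.and_eq_true, decide_eq_true_eq] at hc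
  exact absurd (le_trans h1 hc.2) (by decide)

theorem aLoop_eq : ∀ (cs : List Char) (count : Int), aLoop cs count = count + (bCount cs : Nat)
  | [], count => by simp [aLoop, bCount]
  | c :: rest, count => by
    cases hup : (PySem.Chars.isalpha c && PySem.Chars.isupper c) with
    | true =>
      have hb := hup
      rw [Bool.and_eq_true] at hup
      cases rest with
      | nil =>
        -- single trailing character: symbol is just c; B pairs it with the pad ' '
        rw [show aLoop [c] count = (if [c] ≠ (['H'] : List Char) then count + 1 else count) from by
          simp only [aLoop, hb, if_true]]
        rw [bCount_cons]
        by_cases hH : c = 'H'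
        · subst hH; simp [bCount, bPred]
        · simp [bCount, bPred, hup.1, hup.2, hH]
      | cons d rest' =>
        cases hlow : PySem.Chars.islower d with
        | true =>
          -- A consumes d and skips it; B never counts the lowercase d
          have ih := aLoop_eq rest' (if [c, d] ≠ ['H'] then count + 1 else count)
          have hstep : aLoop (c :: d :: rest') count =
              aLoop rest' (if [c, d] ≠ ['H'] then count + 1 else count) := by
            simp only [aLoop, hb, hlow, if_true]
          rw [hstep, ih, bCount_cons, bCount_cons]
          simp [bPred, hup.1, hup.2, hlow, islower_not_isupper hlow]
          try omega
        | false =>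
          have ih := aLoop_eq (d :: rest') (if [c] ≠ ['H'] then count + 1 else count)
          have hstep : aLoop (c :: d :: rest') count =
              aLoop (d :: rest') (if [c] ≠ ['H'] then count + 1 else count) := by
            simp only [aLoop, hb, hlow, if_true, if_false, Bool.false_eq_true]
          rw [hstep, ih, bCount_cons (c := c)]
          by_cases hH : c = 'H'
          · subst hH; simp [bPred, hlow]
          · simp [bPred, hup.1, hup.2, hH]
            try omega
    | false =>
      have ih := aLoop_eq rest count
      have hstep : aLoop (c :: rest) count = aLoop rest count := by
        rw [aLoop.eq_def]; simp [hup]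
      have hf : bPred (c, rest.headD ' ') = false := by
        simp only [bPred]
        rw [Bool.and_eq_false_iff] at hup
        rcases hup with h | h <;> simp [h]
      rw [hstep, ih, bCount_cons, hf]
      simp
  termination_by cs _ => cs.length
  decreasing_by all_goals simp

-- ===== VERDICT (by name: the statement is the Claim_ definition above) =====
theorem get_heavy_atom_counts_spec : Claim_equal_get_heavy_atom_counts := by
  intro smiles _
  unfold Spec_get_heavy_atom_counts get_heavy_atom_counts get_heavy_atom_counts_alt
  rw [aLoop_eq]
  simp
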